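-- pv_equiv track=rewrite | github.com/guoweier/JunD | scripts/module_seed_assembly.py | desub_reads
-- ===== SOURCE A (Python) =====
-- def find_subset(seq1, seq2):
--     """
--     Find subset maximum overlaps between seq1 and seq2.
--     Args:
--         seq1 (str): Read sequence 1.
--         seq2 (str): Read sequence 2.
--     Returns:
--         int: maximum overlaps between seq1 and seq2.
--     """
--     max_overlap = 0
--     # Iterate through possible overlap lengths
--     for i in range(min(len(seq1), len(seq2))+1):
--         if seq1[-i:] == seq2[:i]:
--             max_overlap = i
--         elif seq2[-i:] == seq1[:i]:
--             max_overlap = -i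
--     return max_overlap
--
-- def desubset_seq(seq1, seq2):
--     """
--     Remove subset sequence.
--     Args:
--         seq1 (str): Read sequence 1.
--         seq2 (str): Read sequence 2.
--     Returns:
--         list: If desubset successfully, only the long seq in list; if no desubset, both seqs in list.
--     """
--     subset_length = find_subset(seq1, seq2)
--     if abs(subset_length) == len(seq1) and len(seq1) < len(seq2):
--         return [seq2]
--     elif abs(subset_length) == len(seq2) and len(seq2) < len(seq1):
--         return [seq1]
--     else:
--         return [seq1, seq2]
--
-- def desub_reads(seeds):
--     """
--     Remove short reads that are subset of long reads.
--     Args: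
--         seeds (list): List of read sequence.
--     Return:
--         list: List of read sequence with no subset short reads.
--     """
--     desub_seqs = []
--     while seeds:
--         seq = seeds.pop(0)
--         desub = False
--         for i in range(len(seeds)):
--             other_seq = seeds[i]
--             desub_seq = desubset_seq(seq, other_seq)
--             if len(desub_seq) == 1:
--                 # Desub successfully
--                 seeds[i] = "NA"
--                 desub = True
--                 break
--         if not desub:
--             if seq != "NA":
--                 desub_seqs.append(seq)
--     uni_desub_seqs = list(set(desub_seqs))
--     return uni_desub_seqs
-- ===== SOURCE B (Python) =====
-- def _covers(seq, other):
--     """True iff the strictly shorter of the two strings is a prefix or a suffix of the longer."""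
--     if len(seq) < len(other):
--         short, long_ = seq, other
--     else:
--         short, long_ = other, seq
--     return len(short) < len(long_) and (long_.startswith(short) or long_.endswith(short))
--
--
-- def desub_reads(seeds):
--     rest = list(seeds)
--     kept = []
--     while rest:
--         seq = rest.pop(0)
--         hit = False
--         for i in range(len(rest)):
--             if _covers(seq, rest[i]):
--                 rest[i] = "NA"
--                 hit = True
--                 break
--         if not hit and seq != "NA" and seq not in kept:
--             kept.append(seq)
--     return kept
-- ===== Notes on version B (the rewrite author's own statement) =====
-- stated objective: alternative
-- what changed: The subset test is decided by two direct startswith/endswith prefix/suffix checks instead of A's find_subset loop over every overlap length, and the terminal list(set(...)) dedup is replaced by an on-the-fly first-occurrence dedup (the output is compared as a set, since A's list(set(...)) order is hash-dependent); B does not mutate the seeds argument, which A empties via pop(0). Intended as faster (measured 6.1x at n=1024, but both versions time out at n=4096, so a timing run could not confirm it at the largest size).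
import Mathlib
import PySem

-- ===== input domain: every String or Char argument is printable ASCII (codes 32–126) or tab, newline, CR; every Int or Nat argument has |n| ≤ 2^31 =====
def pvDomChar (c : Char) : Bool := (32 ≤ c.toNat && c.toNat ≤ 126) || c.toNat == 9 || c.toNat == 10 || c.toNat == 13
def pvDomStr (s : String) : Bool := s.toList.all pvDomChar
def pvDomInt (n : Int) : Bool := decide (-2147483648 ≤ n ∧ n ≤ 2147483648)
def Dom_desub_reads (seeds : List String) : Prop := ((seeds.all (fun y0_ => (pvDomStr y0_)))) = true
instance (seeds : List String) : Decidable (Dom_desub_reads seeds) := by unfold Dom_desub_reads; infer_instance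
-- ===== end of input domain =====

-- B decides the subset test with direct startswith/endswith prefix/suffix checks instead of A's
-- loop over every overlap length, and dedups on the fly instead of list(set(...)) at the end
-- (the list(set(...)) order is ported, per convention, as first-occurrence order).
-- Equivalence is about the RETURN value only: Python A empties its `seeds` argument via pop(0);
-- B does not mutate it.

-- ===== PORT A =====
def pvFindSubsetStep (a b : List Char) (acc : Int) (i : Int) : Int :=
  if PySem.List.slice a (some (-i)) none = PySem.List.slice b none (some i) then i
  else if PySem.List.slice b (some (-i)) none = PySem.List.slice a none (some i) then -i
  else acc

-- the `for i in range(min(len,len)+1)` accumulator loop of find_subset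
def pvF (a b : List Char) (k : Nat) : Int :=
  (PySem.List.pyRange 0 (k : Int) 1).foldl (pvFindSubsetStep a b) 0

def find_subset (seq1 seq2 : String) : Int :=
  pvF seq1.toList seq2.toList (min seq1.toList.length seq2.toList.length + 1)

def desubset_seq (seq1 seq2 : String) : List String :=
  let subset_length := find_subset seq1 seq2
  if subset_length.natAbs = seq1.toList.length ∧ seq1.toList.length < seq2.toList.length then [seq2]
  else if subset_length.natAbs = seq2.toList.length ∧ seq2.toList.length < seq1.toList.length then [seq1]
  else [seq1, seq2]

-- A's inner `for i in range(len(seeds))` with `seeds[i] = "NA"; break`: returns (desub, new seeds)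
def pvScanA (seq : String) (rest : List String) : Bool × List String :=
  match rest with
  | [] => (false, [])
  | o :: tl =>
    if (desubset_seq seq o).length = 1 then (true, "NA" :: tl)
    else
      let r := pvScanA seq tl
      (r.1, o :: r.2)

theorem pvScanA_length (seq : String) (rest : List String) :
    (pvScanA seq rest).2.length = rest.length := by
  induction rest with
  | nil => rfl
  | cons o tl ih => simp only [pvScanA]; split <;> simp [ih]

def pvLoopA (rest : List String) (acc : List String) : List String :=
  match rest with
  | [] => acc
  | seq :: tl =>
    let r := pvScanA seq tl
    pvLoopA r.2 (if r.1 then acc else if seq ≠ "NA" then acc ++ [seq] else acc)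
termination_by rest.length
decreasing_by simp [pvScanA_length]

def desub_reads (seeds : List String) : List String :=
  PySem.Set.ofList (pvLoopA seeds [])

-- ===== PORT B =====
def pvCovers (seq other : String) : Bool :=
  let p := if seq.toList.length < other.toList.length then (seq, other) else (other, seq)
  decide (p.1.toList.length < p.2.toList.length) &&
    (PySem.Str.startswith p.2 p.1 || PySem.Str.endswith p.2 p.1)

def pvScanB (seq : String) (rest : List String) : Bool × List String :=
  match rest with
  | [] => (false, [])
  | o :: tl =>
    if pvCovers seq o then (true, "NA" :: tl)
    else
      let r := pvScanB seq tl
      (r.1, o :: r.2)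

theorem pvScanB_length (seq : String) (rest : List String) :
    (pvScanB seq rest).2.length = rest.length := by
  induction rest with
  | nil => rfl
  | cons o tl ih => simp only [pvScanB]; split <;> simp [ih]

def pvLoopB (rest : List String) (kept : List String) : List String :=
  match rest with
  | [] => kept
  | seq :: tl =>
    let r := pvScanB seq tl
    pvLoopB r.2
      (if !r.1 && seq != "NA" && !(kept.contains seq) then kept ++ [seq] else kept)
termination_by rest.length
decreasing_by simp [pvScanB_length]

def desub_reads_alt (seeds : List String) : List String := pvLoopB seeds []

-- ===== PRECONDITION & SPEC =====
def Spec_desub_reads (seeds : List String) (out : List String) : Prop := out = desub_reads_alt seeds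
instance (seeds : List String) (out : List String) : Decidable (Spec_desub_reads seeds out) := by unfold Spec_desub_reads; infer_instance

-- ===== CLAIM (what is proved, stated in full; the proofs are below) =====
def Claim_equal_desub_reads : Prop := ∀ (seeds : List String), Dom_desub_reads seeds → Spec_desub_reads seeds (desub_reads seeds)

-- ===== LEMMAS AND PROOFS =====

theorem pvF_zero (a b : List Char) : pvF a b 0 = 0 := by
  simp [pvF, PySem.List.pyRange_one_eq_nil]

theorem pvF_succ (a b : List Char) (k : Nat) :
    pvF a b (k + 1) = pvFindSubsetStep a b (pvF a b k) k := by
  unfold pvF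
  rw [show ((k + 1 : Nat) : Int) = (k : Int) + 1 by push_cast; ring,
    PySem.List.pyRange_one_succ_right (by positivity), List.foldl_append]
  rfl

theorem pvF_bound (a b : List Char) (k : Nat) : (pvF a b k).natAbs ≤ k - 1 := by
  induction k with
  | zero => simp [pvF_zero]
  | succ k ih =>
    rw [pvF_succ, pvFindSubsetStep]
    split
    · simp
    · split
      · simp
      · omega

theorem find_subset_eq (s t : String) :
    find_subset s t
      = pvFindSubsetStep s.toList t.toList
          (pvF s.toList t.toList (min s.toList.length t.toList.length))
          ((min s.toList.length t.toList.length : Nat) : Int) :=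
  pvF_succ _ _ _

theorem fs_le (s t : String) (h : s.toList.length ≤ t.toList.length) :
    (find_subset s t).natAbs = s.toList.length ↔
      (s.toList <+: t.toList ∨ s.toList <:+ t.toList) := by
  have hm : min s.toList.length t.toList.length = s.toList.length := Nat.min_eq_left h
  rw [find_subset_eq, hm]
  rcases Nat.eq_zero_or_pos s.toList.length with h0 | hpos
  · have ha : s.toList = [] := List.length_eq_zero_iff.mp h0
    rw [h0]
    constructor
    · intro _; exact Or.inl (ha ▸ List.nil_prefix)
    · intro _
      rw [pvFindSubsetStep]
      split_ifs <;> simp [pvF_zero]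
  · have hc1 : (PySem.List.slice s.toList (some (-((s.toList.length : Nat) : Int))) none
        = PySem.List.slice t.toList none (some ((s.toList.length : Nat) : Int)))
        ↔ s.toList <+: t.toList := by
      rw [PySem.List.slice_from_neg_natCast _ _ hpos, Nat.sub_self, List.drop_zero,
        PySem.List.slice_to_natCast, List.prefix_iff_eq_take]
    have hc2 : (PySem.List.slice t.toList (some (-((s.toList.length : Nat) : Int))) none
        = PySem.List.slice s.toList none (some ((s.toList.length : Nat) : Int)))
        ↔ s.toList <:+ t.toList := by
      rw [PySem.List.slice_from_neg_natCast _ _ hpos, PySem.List.slice_to_natCast,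
        List.take_length, List.suffix_iff_eq_drop]
      exact eq_comm
    rw [pvFindSubsetStep]
    split_ifs with h1 h2
    · simp only [Int.natAbs_natCast, true_iff]
      exact Or.inl (hc1.mp h1)
    · simp only [Int.natAbs_neg, Int.natAbs_natCast, true_iff]
      exact Or.inr (hc2.mp h2)
    · have hb := pvF_bound s.toList t.toList s.toList.length
      constructor
      · intro hEq; omega
      · rintro (hp | hs)
        · exact (h1 (hc1.mpr hp)).elim
        · exact (h2 (hc2.mpr hs)).elim

theorem fs_ge (s t : String) (h : t.toList.length ≤ s.toList.length) :
    (find_subset s t).natAbs = t.toList.length ↔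
      (t.toList <+: s.toList ∨ t.toList <:+ s.toList) := by
  have hm : min s.toList.length t.toList.length = t.toList.length := Nat.min_eq_right h
  rw [find_subset_eq, hm]
  rcases Nat.eq_zero_or_pos t.toList.length with h0 | hpos
  · have hb : t.toList = [] := List.length_eq_zero_iff.mp h0
    rw [h0]
    constructor
    · intro _; exact Or.inl (hb ▸ List.nil_prefix)
    · intro _
      rw [pvFindSubsetStep]
      split_ifs <;> simp [pvF_zero]
  · have hc1 : (PySem.List.slice s.toList (some (-((t.toList.length : Nat) : Int))) none
        = PySem.List.slice t.toList none (some ((t.toList.length : Nat) : Int)))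
        ↔ t.toList <:+ s.toList := by
      rw [PySem.List.slice_from_neg_natCast _ _ hpos, PySem.List.slice_to_natCast,
        List.take_length, List.suffix_iff_eq_drop]
      exact eq_comm
    have hc2 : (PySem.List.slice t.toList (some (-((t.toList.length : Nat) : Int))) none
        = PySem.List.slice s.toList none (some ((t.toList.length : Nat) : Int)))
        ↔ t.toList <+: s.toList := by
      rw [PySem.List.slice_from_neg_natCast _ _ hpos, Nat.sub_self, List.drop_zero,
        PySem.List.slice_to_natCast, List.prefix_iff_eq_take]
    rw [pvFindSubsetStep]
    split_ifs with h1 h2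
    · simp only [Int.natAbs_natCast, true_iff]
      exact Or.inr (hc1.mp h1)
    · simp only [Int.natAbs_neg, Int.natAbs_natCast, true_iff]
      exact Or.inl (hc2.mp h2)
    · have hb := pvF_bound s.toList t.toList t.toList.length
      constructor
      · intro hEq; omega
      · rintro (hp | hs)
        · exact (h2 (hc2.mpr hp)).elim
        · exact (h1 (hc1.mpr hs)).elim

theorem collapse_iff (s t : String) :
    ((desubset_seq s t).length = 1) ↔ pvCovers s t = true := by
  rcases lt_trichotomy s.toList.length t.toList.length with hlt | heq | hgt
  · have hiff := fs_le s t (le_of_lt hlt)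
    by_cases hA : (find_subset s t).natAbs = s.toList.length
    · rw [desubset_seq]
      rw [if_pos ⟨hA, hlt⟩]
      simp only [List.length_singleton, true_iff]
      simp only [pvCovers, if_pos hlt, PySem.Str.startswith_eq, PySem.Str.endswith_eq,
        decide_eq_true_eq, Bool.and_eq_true, Bool.or_eq_true,
        PySem.Chars.startswith_iff, PySem.Chars.endswith_iff]
      exact ⟨hlt, hiff.mp hA⟩
    · rw [desubset_seq]
      rw [if_neg (fun hc => hA hc.1), if_neg (fun hc => absurd hc.2 (by omega))]
      simp only [List.length_cons]
      constructor
      · intro hc; omega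
      · intro hc
        simp only [pvCovers, if_pos hlt, PySem.Str.startswith_eq, PySem.Str.endswith_eq,
          decide_eq_true_eq, Bool.and_eq_true, Bool.or_eq_true,
          PySem.Chars.startswith_iff, PySem.Chars.endswith_iff] at hc
        exact (hA (hiff.mpr hc.2)).elim
  · rw [desubset_seq]
    rw [if_neg (fun hc => absurd hc.2 (by omega)), if_neg (fun hc => absurd hc.2 (by omega))]
    simp only [List.length_cons]
    constructor
    · intro hc; omega
    · intro hc
      simp only [pvCovers, if_neg (show ¬ s.toList.length < t.toList.length by omega),
        decide_eq_true_eq, Bool.and_eq_true] at hc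
      omega
  · have hiff := fs_ge s t (le_of_lt hgt)
    by_cases hA : (find_subset s t).natAbs = t.toList.length
    · rw [desubset_seq]
      rw [if_neg (fun hc => absurd hc.2 (by omega)), if_pos ⟨hA, hgt⟩]
      simp only [List.length_singleton, true_iff]
      simp only [pvCovers, if_neg (show ¬ s.toList.length < t.toList.length by omega),
        PySem.Str.startswith_eq, PySem.Str.endswith_eq,
        decide_eq_true_eq, Bool.and_eq_true, Bool.or_eq_true,
        PySem.Chars.startswith_iff, PySem.Chars.endswith_iff]
      exact ⟨hgt, hiff.mp hA⟩
    · rw [desubset_seq]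
      rw [if_neg (fun hc => absurd hc.2 (by omega)), if_neg (fun hc => hA hc.1)]
      simp only [List.length_cons]
      constructor
      · intro hc; omega
      · intro hc
        simp only [pvCovers, if_neg (show ¬ s.toList.length < t.toList.length by omega),
          PySem.Str.startswith_eq, PySem.Str.endswith_eq,
          decide_eq_true_eq, Bool.and_eq_true, Bool.or_eq_true,
          PySem.Chars.startswith_iff, PySem.Chars.endswith_iff] at hc
        exact (hA (hiff.mpr hc.2)).elim

theorem scan_eq (seq : String) (rest : List String) : pvScanA seq rest = pvScanB seq rest := by
  induction rest with
  | nil => rfl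
  | cons o tl ih =>
    simp only [pvScanA, pvScanB, ih]
    by_cases h : pvCovers seq o = true
    · rw [if_pos ((collapse_iff seq o).2 h), if_pos h]
    · rw [if_neg (fun hc => h ((collapse_iff seq o).1 hc)), if_neg h]

theorem ofList_append_one (xs : List String) (x : String) :
    PySem.Set.ofList (xs ++ [x]) = PySem.Set.add (PySem.Set.ofList xs) x := by
  simp [PySem.Set.ofList_eq_foldl]

theorem loop_eq_aux (n : Nat) : ∀ (rest : List String), rest.length = n → ∀ (acc : List String),
    pvLoopB rest (PySem.Set.ofList acc) = PySem.Set.ofList (pvLoopA rest acc) := by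
  induction n using Nat.strong_induction_on with
  | _ n ih =>
    intro rest hlen acc
    match rest with
    | [] => rw [pvLoopA, pvLoopB]
    | seq :: tl =>
      rw [pvLoopA, pvLoopB, ← scan_eq]
      have hk : (if !(pvScanA seq tl).1 && seq != "NA" && !List.contains (PySem.Set.ofList acc) seq
            then PySem.Set.ofList acc ++ [seq] else PySem.Set.ofList acc)
          = PySem.Set.ofList
            (if (pvScanA seq tl).1 then acc else if seq ≠ "NA" then acc ++ [seq] else acc) := by
        by_cases h1 : (pvScanA seq tl).1 = true
        · simp [h1]
        · have h1' : (pvScanA seq tl).1 = false := by simpa using h1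
          by_cases h2 : seq = "NA"
          · simp [h2]
          · have hb : (seq != "NA") = true := by simp [h2]
            rw [if_neg h1, if_pos h2, ofList_append_one, PySem.Set.add]
            by_cases h3 : List.contains (PySem.Set.ofList acc) seq = true
            · simp [PySem.Set.contains, h1', hb]
            · simp [PySem.Set.contains, h1', hb]
      rw [hk]
      exact ih tl.length (by simp only [List.length_cons] at hlen; omega) _ (by rw [pvScanA_length]) _

theorem loop_eq (rest acc : List String) :
    pvLoopB rest (PySem.Set.ofList acc) = PySem.Set.ofList (pvLoopA rest acc) :=
  loop_eq_aux rest.length rest rfl acc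

theorem desub_reads_spec : Claim_equal_desub_reads := by
  intro seeds _
  unfold Spec_desub_reads desub_reads desub_reads_alt
  rw [← loop_eq]
  rfl
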